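-- pv_equiv track=rewrite | github.com/lajones86/z-reports | application_files/zr_csv.py | get_longest_row
-- ===== SOURCE A (Python) =====
-- def get_longest_row(list_of_csvs):
--     max_length = 0
--     for csv in list_of_csvs:
--         for row in csv:
--             temp_row = row[:]
--             try:
--                 while temp_row[-1] == "":
--                     del temp_row[-1]
--             #row is empty
--             except IndexError:
--                 pass
--             if len(temp_row) > max_length:
--                 max_length = len(temp_row)
--     return(max_length)
-- ===== SOURCE B (Python) =====
-- def get_longest_row(list_of_csvs):
--     max_length = 0
--     for csv in list_of_csvs:
--         for row in csv:
--             last = 0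
--             for i, cell in enumerate(row):
--                 if cell != "":
--                     last = i + 1
--             if last > max_length:
--                 max_length = last
--     return max_length
-- ===== Notes on version B (the rewrite author's own statement) =====
-- stated objective: simpler
-- what changed: Replaces A's copy-the-row-then-delete-trailing-empties-until-IndexError loop with a single forward enumerate scan tracking the position just past the last non-empty cell; no copy, no exception handling.
import Mathlib
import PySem

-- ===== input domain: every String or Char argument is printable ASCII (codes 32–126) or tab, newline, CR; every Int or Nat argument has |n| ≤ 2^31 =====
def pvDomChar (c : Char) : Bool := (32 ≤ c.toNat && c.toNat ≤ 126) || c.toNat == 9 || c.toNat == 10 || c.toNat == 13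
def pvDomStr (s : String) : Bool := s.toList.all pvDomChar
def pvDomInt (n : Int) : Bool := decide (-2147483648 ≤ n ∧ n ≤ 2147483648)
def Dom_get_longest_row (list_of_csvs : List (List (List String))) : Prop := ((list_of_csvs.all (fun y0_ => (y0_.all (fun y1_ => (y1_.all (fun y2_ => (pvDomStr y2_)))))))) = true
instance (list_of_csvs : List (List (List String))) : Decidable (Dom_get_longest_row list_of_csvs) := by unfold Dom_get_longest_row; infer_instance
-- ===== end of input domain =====

-- B replaces A's copy-row-then-delete-trailing-empties(-until-IndexError) loop with a single forward
-- enumerate scan remembering the position past the last non-empty cell (objective: simpler).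


-- ===== PORT A =====
-- while temp_row[-1] == "": del temp_row[-1]   (IndexError on empty list ends the loop)
def trimA (l : List String) : List String :=
  match h : l.getLast? with
  | none => l
  | some x => if x = "" then trimA l.dropLast else l
termination_by l.length
decreasing_by
  have hne : l ≠ [] := by intro hn; simp [hn] at h
  have hpos := List.length_pos_of_ne_nil hne
  simp [List.length_dropLast]; omega

def get_longest_row (list_of_csvs : List (List (List String))) : Int :=
  list_of_csvs.foldl (fun max_length csv =>
    csv.foldl (fun max_length row =>
      let temp_row := trimA row
      if (temp_row.length : Int) > max_length then (temp_row.length : Int) else max_length)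
      max_length) 0

-- ===== PORT B =====
-- forward scan: last = i + 1 at every non-empty cell
def rowLast (row : List String) : Int :=
  (PySem.List.enumerate row).foldl
    (fun last p => if p.2 ≠ "" then p.1 + 1 else last) 0

def get_longest_row_alt (list_of_csvs : List (List (List String))) : Int :=
  list_of_csvs.foldl (fun max_length csv =>
    csv.foldl (fun max_length row =>
      let last := rowLast row
      if last > max_length then last else max_length)
      max_length) 0

-- ===== PRECONDITION & SPEC =====
def Spec_get_longest_row (list_of_csvs : List (List (List String))) (out : Int) : Prop := out = get_longest_row_alt list_of_csvs
instance (list_of_csvs : List (List (List String))) (out : Int) : Decidable (Spec_get_longest_row list_of_csvs out) := by unfold Spec_get_longest_row; infer_instance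

-- ===== CLAIM (what is proved, stated in full; the proofs are below) =====
def Claim_equal_get_longest_row : Prop := ∀ (list_of_csvs : List (List (List String))), Dom_get_longest_row list_of_csvs → Spec_get_longest_row list_of_csvs (get_longest_row list_of_csvs)

-- ===== LEMMAS AND PROOFS =====

theorem trimA_nil : trimA [] = [] := by simp [trimA]

theorem trimA_append_singleton (l : List String) (x : String) :
    trimA (l ++ [x]) = if x = "" then trimA l else l ++ [x] := by
  rw [trimA]
  split
  · rename_i h; simp at h
  · rename_i x' h
    rw [List.getLast?_concat] at h
    cases h
    rw [List.dropLast_concat]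

theorem rowLast_nil : rowLast [] = 0 := by simp [rowLast, PySem.List.enumerate]

theorem rowLast_append_singleton (l : List String) (x : String) :
    rowLast (l ++ [x]) = if x = "" then rowLast l else (l.length : Int) + 1 := by
  unfold rowLast
  rw [PySem.List.enumerate_append, List.foldl_append]
  simp [PySem.List.enumerate]

theorem trimA_len_eq_rowLast (row : List String) :
    ((trimA row).length : Int) = rowLast row := by
  induction row using List.reverseRecOn with
  | nil => simp [trimA_nil, rowLast_nil]
  | append_singleton l x ih =>
    rw [trimA_append_singleton, rowLast_append_singleton]
    split <;> simp [ih]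

-- ===== VERDICT (by name: the statement is the Claim_ definition above) =====
theorem get_longest_row_spec : Claim_equal_get_longest_row := by
  intro list_of_csvs _
  unfold Spec_get_longest_row get_longest_row get_longest_row_alt
  congr 1
  funext m csv
  congr 1
  funext m' row
  simp only [trimA_len_eq_rowLast]
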